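-- pv_equiv track=rewrite | github.com/MrBrantCode/unitest_baseline | mut_generate/mist_train_cf/cf_77786/solution.py | aggregate_vowels
-- ===== SOURCE A (Python) =====
-- def aggregate_vowels(words):
--     vowels_count = {"a": 0, "e": 0, "i": 0, "o": 0, "u": 0}
--     vowels = ['a', 'e', 'i', 'o', 'u']
--
--     for word in words:
--         # eliminating words that start with a consonant and words that contain non-alphabetic characters
--         if word[0].lower() in vowels and word.isalpha():
--             for letter in word.lower():
--                 if letter in vowels:
--                     vowels_count[letter] += 1
--
--     return vowels_count
-- ===== SOURCE B (Python) =====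
-- def aggregate_vowels(words):
--     # Vowel-major traversal: for each vowel, one full pass over words summing
--     # its occurrences; the result dict is built key by key in the outer loop.
--     result = {}
--     for v in "aeiou":
--         total = 0
--         for word in words:
--             if word[0].lower() in "aeiou" and word.isalpha():
--                 total += sum(1 for c in word.lower() if c == v)
--         result[v] = total
--     return result
-- ===== Notes on version B (the rewrite author's own statement) =====
-- stated objective: alternative
-- what changed: A makes one word-major pass incrementing a per-vowel dict letter by letter; B inverts the loop nest to a vowel-major traversal: for each of the five vowels it makes a full pass over the words summing that vowel's occurrences into an integer accumulator and builds the result dict key by key, maintaining no counting dict at all.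
import Mathlib
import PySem

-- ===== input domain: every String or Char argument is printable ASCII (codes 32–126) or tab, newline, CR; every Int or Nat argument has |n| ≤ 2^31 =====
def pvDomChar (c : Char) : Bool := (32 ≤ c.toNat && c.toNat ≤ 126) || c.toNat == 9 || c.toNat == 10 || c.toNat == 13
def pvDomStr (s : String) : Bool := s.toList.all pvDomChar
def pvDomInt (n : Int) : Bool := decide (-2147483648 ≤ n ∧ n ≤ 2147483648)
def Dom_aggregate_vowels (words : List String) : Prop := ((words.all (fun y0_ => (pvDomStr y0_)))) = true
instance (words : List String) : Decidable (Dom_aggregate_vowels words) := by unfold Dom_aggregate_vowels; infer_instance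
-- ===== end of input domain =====

-- B inverts A's loop nest: vowel-major (one pass over words per vowel, integer accumulator,
-- dict built key by key) instead of A's word-major pass incrementing a counting dict.

-- ===== PORT A =====
def pvVowels : List Char := ['a', 'e', 'i', 'o', 'u']

-- guard of both Pythons: word[0].lower() in vowels and word.isalpha() (word[0] raises on "")
def pvGuard (word : String) : Bool :=
  (match PySem.Str.pyGet? word 0 with
   | none => false
   | some c0 => pvVowels.contains (PySem.Chars.lowerChar c0)) && PySem.Str.strIsalpha word

def aggregate_vowels (words : List String) : List (String × Int) :=
  let init : PySem.Dict String Int :=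
    ((((PySem.Dict.empty.insert "a" 0).insert "e" 0).insert "i" 0).insert "o" 0).insert "u" 0
  (words.foldl (fun d word =>
    if pvGuard word then
      (PySem.Str.lower word).toList.foldl
        (fun d2 letter =>
          if pvVowels.contains letter then d2.modify (String.singleton letter) 0 (· + 1) else d2) d
    else d) init).items

-- ===== PORT B =====
def aggregate_vowels_alt (words : List String) : List (String × Int) :=
  (pvVowels.foldl (fun result v =>
      result.insert (String.singleton v)
        (words.foldl (fun total word =>
            if pvGuard word then
              total + (PySem.Str.lower word).toList.foldl
                        (fun s c => if c == v then s + 1 else s) (0 : Int)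
            else total) (0 : Int)))
    PySem.Dict.empty).items

-- ===== PRECONDITION & SPEC =====
-- Pre_ excludes lists containing an empty string, on which A raises IndexError at word[0].
def Pre_aggregate_vowels (words : List String) : Prop := ∀ w ∈ words, w ≠ ""
instance (words : List String) : Decidable (Pre_aggregate_vowels words) := by unfold Pre_aggregate_vowels; infer_instance
def pvWitness_aggregate_vowels : List String := ["Apple", "sky", "o k", "UI"]

def Spec_aggregate_vowels (words : List String) (out : List (String × Int)) : Prop := out = aggregate_vowels_alt words
instance (words : List String) (out : List (String × Int)) : Decidable (Spec_aggregate_vowels words out) := by unfold Spec_aggregate_vowels; infer_instance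

-- ===== CLAIM =====
def Claim_equal_aggregate_vowels : Prop := ∀ (words : List String), Dom_aggregate_vowels words → Pre_aggregate_vowels words → Spec_aggregate_vowels words (aggregate_vowels words)

-- ===== LEMMAS AND PROOFS =====
def pvMkd (a e i o u : Int) : PySem.Dict String Int :=
  PySem.Dict.mk [("a", a), ("e", e), ("i", i), ("o", o), ("u", u)]

-- the lowercased letters of qualifying words, in order (characterises A's data)
def pvQual (ws : List String) : List Char :=
  ws.foldl (fun acc w => if pvGuard w then acc ++ (PySem.Str.lower w).toList else acc) []

theorem pv_qual_acc (ws : List String) (acc : List Char) :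
    ws.foldl (fun acc w => if pvGuard w then acc ++ (PySem.Str.lower w).toList else acc) acc
      = acc ++ pvQual ws := by
  induction ws generalizing acc with
  | nil => simp [pvQual]
  | cons w ws ih =>
    rw [pvQual, List.foldl_cons, List.foldl_cons, ih, ih]
    by_cases hg : pvGuard w = true
    · simp [hg]
    · simp [hg]

theorem pvQual_cons (w : String) (ws : List String) :
    pvQual (w :: ws)
      = (if pvGuard w then (PySem.Str.lower w).toList else []) ++ pvQual ws := by
  rw [pvQual, List.foldl_cons, pv_qual_acc]
  by_cases hg : pvGuard w = true
  · simp [hg]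
  · simp [hg]

-- A's inner per-word loop bumps the five dict entries by that word's vowel counts
theorem pv_inner (cs : List Char) (a e i o u : Int) :
    cs.foldl (fun d2 letter =>
        if pvVowels.contains letter then d2.modify (String.singleton letter) 0 (· + 1) else d2)
      (pvMkd a e i o u)
    = pvMkd (a + cs.count 'a') (e + cs.count 'e') (i + cs.count 'i')
            (o + cs.count 'o') (u + cs.count 'u') := by
  induction cs generalizing a e i o u with
  | nil => simp
  | cons c cs ih =>
    rw [List.foldl_cons]
    by_cases h : c = 'a' ∨ c = 'e' ∨ c = 'i' ∨ c = 'o' ∨ c = 'u'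
    · rcases h with h | h | h | h | h <;> subst h
      · rw [show (if pvVowels.contains 'a' = true then (pvMkd a e i o u).modify (String.singleton 'a') 0 (· + 1) else pvMkd a e i o u) = pvMkd (a+1) e i o u from rfl, ih]
        simp [pvMkd]; omega
      · rw [show (if pvVowels.contains 'e' = true then (pvMkd a e i o u).modify (String.singleton 'e') 0 (· + 1) else pvMkd a e i o u) = pvMkd a (e+1) i o u from rfl, ih]
        simp [pvMkd]; omega
      · rw [show (if pvVowels.contains 'i' = true then (pvMkd a e i o u).modify (String.singleton 'i') 0 (· + 1) else pvMkd a e i o u) = pvMkd a e (i+1) o u from rfl, ih]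
        simp [pvMkd]; omega
      · rw [show (if pvVowels.contains 'o' = true then (pvMkd a e i o u).modify (String.singleton 'o') 0 (· + 1) else pvMkd a e i o u) = pvMkd a e i (o+1) u from rfl, ih]
        simp [pvMkd]; omega
      · rw [show (if pvVowels.contains 'u' = true then (pvMkd a e i o u).modify (String.singleton 'u') 0 (· + 1) else pvMkd a e i o u) = pvMkd a e i o (u+1) from rfl, ih]
        simp [pvMkd]; omega
    · simp only [not_or] at h
      obtain ⟨h1, h2, h3, h4, h5⟩ := h
      have hc : pvVowels.contains c = false := by
        simp [pvVowels, h1, h2, h3, h4, h5]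
      rw [hc]
      simp only [Bool.false_eq_true, if_false, ih]
      simp [h1, h2, h3, h4, h5]

-- A's outer fold = five totals over the qualifying letters
theorem pv_mainA (ws : List String) (a e i o u : Int) :
    ws.foldl (fun d word =>
      if pvGuard word then
        (PySem.Str.lower word).toList.foldl
          (fun d2 letter =>
            if pvVowels.contains letter then d2.modify (String.singleton letter) 0 (· + 1) else d2) d
      else d) (pvMkd a e i o u)
    = pvMkd (a + (pvQual ws).count 'a') (e + (pvQual ws).count 'e')
            (i + (pvQual ws).count 'i') (o + (pvQual ws).count 'o')
            (u + (pvQual ws).count 'u') := by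
  induction ws generalizing a e i o u with
  | nil => simp [pvQual]
  | cons w ws ih =>
    rw [List.foldl_cons, pvQual_cons]
    by_cases hg : pvGuard w = true
    · rw [if_pos hg, if_pos hg, pv_inner, ih]
      simp only [List.count_append, pvMkd]
      simp
      omega
    · rw [if_neg hg, if_neg hg, ih]
      simp

-- B's per-vowel pass over the words = the count of that vowel among the qualifying letters
theorem pv_totB (v : Char) (ws : List String) (t : Int) :
    ws.foldl (fun total word =>
        if pvGuard word then
          total + (PySem.Str.lower word).toList.foldl (fun s c => if c == v then s + 1 else s) (0 : Int)
        else total) t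
    = t + ((pvQual ws).count v : Int) := by
  induction ws generalizing t with
  | nil => simp [pvQual]
  | cons w ws ih =>
    rw [List.foldl_cons, pvQual_cons]
    by_cases hg : pvGuard w = true
    · rw [if_pos hg, ih, PySem.List.foldl_beq_add_one]
      simp only [List.count_append, if_pos hg]
      push_cast
      ring
    · rw [if_neg hg, ih]
      simp [hg]

-- B's five key-by-key inserts into the empty dict form the same association list as A's init shape
theorem pvB_dict (ta te ti tO tU : Int) :
    ((((PySem.Dict.empty.insert (String.singleton 'a') ta).insert (String.singleton 'e') te).insert
        (String.singleton 'i') ti).insert (String.singleton 'o') tO).insert (String.singleton 'u') tU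
      = pvMkd ta te ti tO tU := rfl

-- ===== VERDICT =====
theorem aggregate_vowels_spec : Claim_equal_aggregate_vowels := by
  intro words _ _
  show aggregate_vowels words = aggregate_vowels_alt words
  simp only [aggregate_vowels, aggregate_vowels_alt]
  rw [show ((((PySem.Dict.empty.insert "a" (0:Int)).insert "e" 0).insert "i" 0).insert "o" 0).insert "u" 0
      = pvMkd 0 0 0 0 0 from rfl]
  rw [pv_mainA words 0 0 0 0 0]
  simp only [pvVowels, List.foldl_cons, List.foldl_nil]
  rw [pv_totB 'a', pv_totB 'e', pv_totB 'i', pv_totB 'o', pv_totB 'u', pvB_dict]
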